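-- pv_equiv track=rewrite | github.com/alextanhongpin/advent-of-code-2016 | day07.py | has_ssl
-- ===== SOURCE A (Python) =====
-- def is_aba(ip: str) -> list[tuple[str, str]]:
--     n = len(ip)
--     res = []
--     for i in range(n - 2):
--         a, b, c = ip[i:i+3]
--         if a == c and a != b:
--             res.append((a, b))
--     return res
--
-- def has_ssl(ins: list[str], out: list[str]) -> bool:
--     abas = set()
--     for ip in out:
--         aba = is_aba(ip)
--         for t in aba:
--             abas.add(t)
--     for ip in ins:
--         bab = is_aba(ip)
--         for (b, a) in bab:
--             if (a, b) in abas: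
--                 return True
--     return False
-- ===== SOURCE B (Python) =====
-- def has_ssl(ins: list[str], out: list[str]) -> bool:
--     # No pattern set: for each BAB window in ins, search the corresponding
--     # ABA directly as a substring of the out strings.
--     for ip in ins:
--         for i in range(len(ip) - 2):
--             a, b = ip[i], ip[i + 1]
--             if a == ip[i + 2] and a != b:
--                 if any(b + a + b in s for s in out):
--                     return True
--     return False
-- ===== Notes on version B (the rewrite author's own statement) =====
-- stated objective: simpler
-- what changed: Drops the precomputed ABA pattern set entirely: B scans ins for BAB windows and, for each candidate, tests the 3-character string b+a+b directly as a substring of the out strings, replacing index-building plus set membership by direct substring search.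
import Mathlib
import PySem

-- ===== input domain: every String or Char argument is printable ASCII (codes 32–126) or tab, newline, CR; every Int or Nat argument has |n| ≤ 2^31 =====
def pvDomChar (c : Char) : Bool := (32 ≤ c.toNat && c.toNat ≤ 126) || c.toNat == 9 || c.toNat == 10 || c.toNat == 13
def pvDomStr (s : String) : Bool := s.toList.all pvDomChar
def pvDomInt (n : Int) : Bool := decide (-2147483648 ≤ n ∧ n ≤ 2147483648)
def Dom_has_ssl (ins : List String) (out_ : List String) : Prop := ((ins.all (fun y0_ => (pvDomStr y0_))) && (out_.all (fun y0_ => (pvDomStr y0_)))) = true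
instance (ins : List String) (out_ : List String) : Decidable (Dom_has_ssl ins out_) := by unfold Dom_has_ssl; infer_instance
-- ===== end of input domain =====

-- B drops the precomputed ABA pattern set: it scans ins for BAB windows and
-- substring-searches b+a+b directly in the out strings (objective: simpler).

-- ===== PORT A =====
-- is_aba: index loop over range(n-2), unpacking the slice ip[i:i+3]
def isAba (ip : String) : List (Char × Char) :=
  (PySem.List.pyRange 0 (PySem.List.len ip.toList - 2) 1).foldl
    (fun res i =>
      match PySem.List.slice ip.toList (some i) (some (i + 3)) with
      | [a, b, c] => if a = c ∧ a ≠ b then res ++ [(a, b)] else res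
      | _ => res) []

-- the early 'return True' of the nested loop is the List.any
def has_ssl (ins : List String) (out_ : List String) : Bool :=
  let abas : PySem.Set (Char × Char) :=
    out_.foldl (fun abas ip => (isAba ip).foldl (fun s t => PySem.Set.add s t) abas)
      PySem.Set.empty
  ins.any (fun ip => (isAba ip).any (fun t => PySem.Set.contains abas (t.2, t.1)))

-- ===== PORT B =====
-- the two early 'return True' loops become List.any; ip[i]/ip[i+1]/ip[i+2] are
-- the pyGet? lookups, and 'b + a + b in s' is Chars.isIn on the 3-char list
def has_ssl_alt (ins : List String) (out_ : List String) : Bool :=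
  ins.any (fun ip =>
    (PySem.List.pyRange 0 (PySem.List.len ip.toList - 2) 1).any (fun i =>
      match PySem.List.pyGet? ip.toList i, PySem.List.pyGet? ip.toList (i + 1),
        PySem.List.pyGet? ip.toList (i + 2) with
      | some a, some b, some c =>
        if a = c ∧ a ≠ b then out_.any (fun s => PySem.Chars.isIn [b, a, b] s.toList)
        else false
      | _, _, _ => false))

-- ===== PRECONDITION & SPEC =====
def Spec_has_ssl (ins : List String) (out_ : List String) (out : Bool) : Prop := out = has_ssl_alt ins out_
instance (ins : List String) (out_ : List String) (out : Bool) : Decidable (Spec_has_ssl ins out_ out) := by unfold Spec_has_ssl; infer_instance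

-- ===== CLAIM (what is proved, stated in full; the proofs are below) =====
def Claim_equal_has_ssl : Prop := ∀ (ins : List String) (out_ : List String), Dom_has_ssl ins out_ → Spec_has_ssl ins out_ (has_ssl ins out_)

-- ===== LEMMAS AND PROOFS =====

-- the ABA-window list both programs are about
def win : List Char → List (Char × Char)
  | a :: b :: c :: rest => (if a = c ∧ a ≠ b then [(a, b)] else []) ++ win (b :: c :: rest)
  | _ => []

-- both ports drive their loop by range(len(ip) - 2); this is that index list
lemma range_conv (cs : List Char) :
    PySem.List.pyRange 0 (PySem.List.len cs - 2) 1
      = (List.range (cs.length - 2)).map (fun k => ((k : Nat) : Int)) := by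
  rw [PySem.List.pyRange_one]
  have h : (PySem.List.len cs - 2 - 0).toNat = cs.length - 2 := by
    simp [PySem.List.len_eq]
    omega
  rw [h]
  simp

lemma win_core (cs : List Char) (res : List (Char × Char)) :
    (List.range (cs.length - 2)).foldl
      (fun res (k : Nat) =>
        match (cs.drop k).take 3 with
        | [a, b, c] => if a = c ∧ a ≠ b then res ++ [(a, b)] else res
        | _ => res) res = res ++ win cs := by
  induction cs generalizing res with
  | nil => simp [win]
  | cons a t ih =>
    match t with
    | [] => simp [win]
    | [b] => simp [win]
    | b :: c :: rest =>
      have hlen : (a :: b :: c :: rest).length - 2 = (b :: c :: rest).length - 2 + 1 := by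
        simp
      rw [hlen, List.range_succ_eq_map]
      simp only [List.foldl_cons, List.foldl_map, List.drop_succ_cons, List.drop_zero,
        List.take_succ_cons, List.take_zero]
      rw [ih]
      by_cases h : a = c ∧ a ≠ b
      · obtain ⟨rfl, hne⟩ := h
        simp [win, hne]
      · simp [win, h]

lemma isAba_eq_win (ip : String) : isAba ip = win ip.toList := by
  unfold isAba
  rw [range_conv, List.foldl_map]
  have := win_core ip.toList []
  rw [← List.nil_append (win ip.toList), ← this]
  apply PySem.List.foldl_congr_mem
  intro res k _
  have h3 : ((k : Int) + 3) = (((k + 3 : Nat) : Int)) := by push_cast; ring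
  rw [h3, PySem.List.slice_natCast]
  have : k + 3 - k = 3 := by omega
  rw [this]

lemma mem_abasA (out_ : List String) (s : PySem.Set (Char × Char)) (p : Char × Char) :
    p ∈ out_.foldl (fun abas ip => (isAba ip).foldl (fun s t => PySem.Set.add s t) abas) s ↔
      p ∈ s ∨ ∃ ip ∈ out_, p ∈ isAba ip := by
  induction out_ generalizing s with
  | nil => simp
  | cons x xs ih =>
    simp only [List.foldl_cons, ih]
    have hinner : ∀ (l : List (Char × Char)) (s : PySem.Set (Char × Char)),
        p ∈ l.foldl (fun s t => PySem.Set.add s t) s ↔ p ∈ s ∨ p ∈ l := by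
      intro l
      induction l with
      | nil => simp
      | cons y ys ihy =>
        intro s
        simp only [List.foldl_cons, ihy, PySem.Set.mem_add, List.mem_cons]
        tauto
    rw [hinner]
    simp only [List.mem_cons]
    constructor
    · rintro ((h | h) | ⟨ip, hip, hm⟩)
      · exact Or.inl h
      · exact Or.inr ⟨x, Or.inl rfl, h⟩
      · exact Or.inr ⟨ip, Or.inr hip, hm⟩
    · rintro (h | ⟨ip, hip | hip, hm⟩)
      · exact Or.inl (Or.inl h)
      · exact Or.inl (Or.inr (hip ▸ hm))
      · exact Or.inr ⟨ip, hip, hm⟩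

lemma mem_win_cons (p q a b c : Char) (rest : List Char) :
    (p, q) ∈ win (a :: b :: c :: rest) ↔
      (a = c ∧ a ≠ b ∧ p = a ∧ q = b) ∨ (p, q) ∈ win (b :: c :: rest) := by
  rw [win, List.mem_append]
  by_cases h : a = c ∧ a ≠ b
  · obtain ⟨rfl, hne⟩ := h
    rw [if_pos ⟨rfl, hne⟩]
    simp [hne]
  · rw [if_neg h]
    simp only [List.not_mem_nil, false_or]
    constructor
    · exact Or.inr
    · rintro (⟨h1, h2, -, -⟩ | hm)
      · exact absurd ⟨h1, h2⟩ h
      · exact hm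

-- (p, q) is a window of cs iff the chars at some index k are p, q, p (and p ≠ q)
lemma mem_win_iff_triple (p q : Char) (cs : List Char) :
    (p, q) ∈ win cs ↔
      p ≠ q ∧ ∃ k : Nat, cs[k]? = some p ∧ cs[k + 1]? = some q ∧ cs[k + 2]? = some p := by
  induction cs with
  | nil =>
    simp only [win, List.not_mem_nil, false_iff, not_and]
    rintro - ⟨k, h0, -, -⟩
    simp at h0
  | cons a t ih =>
    match t with
    | [] =>
      simp only [win, List.not_mem_nil, false_iff, not_and]
      rintro - ⟨k, -, h1, -⟩
      rw [List.getElem?_eq_none (by simp only [List.length_cons, List.length_nil]; omega)] at h1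
      simp at h1
    | [b] =>
      simp only [win, List.not_mem_nil, false_iff, not_and]
      rintro - ⟨k, -, -, h2⟩
      rw [List.getElem?_eq_none (by simp only [List.length_cons, List.length_nil]; omega)] at h2
      simp at h2
    | b :: c :: rest =>
      rw [mem_win_cons, ih]
      constructor
      · rintro (⟨rfl, hne, rfl, rfl⟩ | ⟨hne, k, h0, h1, h2⟩)
        · exact ⟨hne, 0, by simp⟩
        · exact ⟨hne, k + 1, by simpa using h0, by simpa using h1, by simpa using h2⟩
      · rintro ⟨hne, k, h0, h1, h2⟩
        match k with
        | 0 =>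
          simp at h0 h1 h2
          subst h0; subst h1; subst h2
          exact Or.inl ⟨rfl, hne, rfl, rfl⟩
        | k + 1 =>
          simp only [List.getElem?_cons_succ] at h0 h1 h2
          exact Or.inr ⟨hne, k, h0, h1, h2⟩

lemma prefix3 (p q r : Char) (t : List Char) :
    [p, q, r] <+: t ↔ t[0]? = some p ∧ t[1]? = some q ∧ t[2]? = some r := by
  match t with
  | [] => simp
  | [x] =>
    constructor
    · intro h
      have := h.length_le
      simp at this
    · rintro ⟨-, h1, -⟩
      simp at h1
  | [x, y] =>
    constructor
    · intro h
      have := h.length_le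
      simp at this
    · rintro ⟨-, -, h2⟩
      simp at h2
  | x :: y :: z :: rest =>
    simp [List.cons_prefix_cons]
    tauto

-- 'b + a + b in s' holds iff (b, a) is a window of s (for distinct chars)
lemma isIn_iff_mem_win (p q : Char) (hne : p ≠ q) (s : List Char) :
    PySem.Chars.isIn [p, q, p] s = true ↔ (p, q) ∈ win s := by
  rw [← PySem.Chars.exists_prefix_drop_iff_isIn, mem_win_iff_triple]
  constructor
  · rintro ⟨j, hj⟩
    rw [prefix3] at hj
    refine ⟨hne, j, ?_, ?_, ?_⟩
    · simpa [List.getElem?_drop] using hj.1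
    · simpa [List.getElem?_drop] using hj.2.1
    · simpa [List.getElem?_drop] using hj.2.2
  · rintro ⟨-, k, h0, h1, h2⟩
    refine ⟨k, ?_⟩
    rw [prefix3]
    refine ⟨?_, ?_, ?_⟩
    · simpa [List.getElem?_drop] using h0
    · simpa [List.getElem?_drop] using h1
    · simpa [List.getElem?_drop] using h2

-- A's result, characterised through win
lemma A_iff (ins out_ : List String) :
    has_ssl ins out_ = true ↔
      ∃ ip ∈ ins, ∃ x y : Char, (x, y) ∈ win ip.toList ∧
        ∃ s ∈ out_, (y, x) ∈ win s.toList := by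
  unfold has_ssl
  simp only [List.any_eq_true]
  constructor
  · rintro ⟨ip, hip, t, ht, hc⟩
    rw [isAba_eq_win] at ht
    have hmem := (PySem.Set.contains_iff _ _).mp hc
    rcases (mem_abasA out_ PySem.Set.empty (t.2, t.1)).mp hmem with h | ⟨jp, hjp, hm⟩
    · simp [PySem.Set.empty] at h
    · rw [isAba_eq_win] at hm
      exact ⟨ip, hip, t.1, t.2, ht, jp, hjp, hm⟩
  · rintro ⟨ip, hip, x, y, hw, s, hs, hm⟩
    refine ⟨ip, hip, (x, y), by rwa [isAba_eq_win], ?_⟩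
    apply (PySem.Set.contains_iff _ _).mpr
    apply (mem_abasA out_ PySem.Set.empty (y, x)).mpr
    exact Or.inr ⟨s, hs, by rwa [isAba_eq_win]⟩

-- B's result, characterised through win
lemma B_iff (ins out_ : List String) :
    has_ssl_alt ins out_ = true ↔
      ∃ ip ∈ ins, ∃ x y : Char, (x, y) ∈ win ip.toList ∧
        ∃ s ∈ out_, PySem.Chars.isIn [y, x, y] s.toList = true := by
  unfold has_ssl_alt
  rw [List.any_eq_true]
  have hone : ∀ ip : String,
      ((PySem.List.pyRange 0 (PySem.List.len ip.toList - 2) 1).any (fun i =>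
        match PySem.List.pyGet? ip.toList i, PySem.List.pyGet? ip.toList (i + 1),
          PySem.List.pyGet? ip.toList (i + 2) with
        | some a, some b, some c =>
          if a = c ∧ a ≠ b then out_.any (fun s => PySem.Chars.isIn [b, a, b] s.toList)
          else false
        | _, _, _ => false)) = true ↔
      ∃ x y : Char, (x, y) ∈ win ip.toList ∧
        ∃ s ∈ out_, PySem.Chars.isIn [y, x, y] s.toList = true := by
    intro ip
    rw [range_conv, List.any_map, List.any_eq_true]
    constructor
    · rintro ⟨k, hk, hP⟩
      rw [List.mem_range] at hk
      simp only [Function.comp_def] at hP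
      have e1 : ((k : Int) + 1) = (((k + 1 : Nat) : Int)) := by push_cast; ring
      have e2 : ((k : Int) + 2) = (((k + 2 : Nat) : Int)) := by push_cast; ring
      rw [e1, e2, PySem.List.pyGet?_natCast, PySem.List.pyGet?_natCast,
        PySem.List.pyGet?_natCast] at hP
      have hk0 : k < ip.toList.length := by omega
      have hk1 : k + 1 < ip.toList.length := by omega
      have hk2 : k + 2 < ip.toList.length := by omega
      rw [List.getElem?_eq_getElem hk0, List.getElem?_eq_getElem hk1,
        List.getElem?_eq_getElem hk2] at hP
      by_cases hc : ip.toList[k] = ip.toList[k + 2] ∧ ip.toList[k] ≠ ip.toList[k + 1]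
      · rw [show (match some ip.toList[k], some ip.toList[k + 1], some ip.toList[k + 2] with
              | some a, some b, some c =>
                if a = c ∧ a ≠ b then out_.any (fun s => PySem.Chars.isIn [b, a, b] s.toList)
                else false
              | _, _, _ => false)
            = if ip.toList[k] = ip.toList[k + 2] ∧ ip.toList[k] ≠ ip.toList[k + 1] then
                out_.any (fun s => PySem.Chars.isIn [ip.toList[k + 1], ip.toList[k],
                  ip.toList[k + 1]] s.toList) else false from rfl, if_pos hc,
          List.any_eq_true] at hP
        refine ⟨ip.toList[k], ip.toList[k + 1], ?_, hP⟩
        rw [mem_win_iff_triple]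
        refine ⟨hc.2, k, by simp, by simp, ?_⟩
        rw [List.getElem?_eq_getElem hk2, ← hc.1]
      · rw [show (match some ip.toList[k], some ip.toList[k + 1], some ip.toList[k + 2] with
              | some a, some b, some c =>
                if a = c ∧ a ≠ b then out_.any (fun s => PySem.Chars.isIn [b, a, b] s.toList)
                else false
              | _, _, _ => false)
            = if ip.toList[k] = ip.toList[k + 2] ∧ ip.toList[k] ≠ ip.toList[k + 1] then
                out_.any (fun s => PySem.Chars.isIn [ip.toList[k + 1], ip.toList[k],
                  ip.toList[k + 1]] s.toList) else false from rfl, if_neg hc] at hP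
        exact absurd hP (by simp)
    · rintro ⟨x, y, hw, s, hs, hin⟩
      rw [mem_win_iff_triple] at hw
      obtain ⟨hne, k, h0, h1, h2⟩ := hw
      have hk2 : k + 2 < ip.toList.length := by
        by_contra hcon
        rw [List.getElem?_eq_none (by omega)] at h2
        simp at h2
      refine ⟨k, List.mem_range.mpr (by omega), ?_⟩
      simp only [Function.comp_def]
      have e1 : ((k : Int) + 1) = (((k + 1 : Nat) : Int)) := by push_cast; ring
      have e2 : ((k : Int) + 2) = (((k + 2 : Nat) : Int)) := by push_cast; ring
      rw [e1, e2, PySem.List.pyGet?_natCast, PySem.List.pyGet?_natCast,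
        PySem.List.pyGet?_natCast, h0, h1, h2]
      rw [show (match some x, some y, some x with
            | some a, some b, some c =>
              if a = c ∧ a ≠ b then out_.any (fun s => PySem.Chars.isIn [b, a, b] s.toList)
              else false
            | _, _, _ => false)
          = if x = x ∧ x ≠ y then
              out_.any (fun s => PySem.Chars.isIn [y, x, y] s.toList) else false from rfl,
        if_pos ⟨rfl, hne⟩, List.any_eq_true]
      exact ⟨s, hs, hin⟩
  constructor
  · rintro ⟨ip, hip, h⟩
    rcases (hone ip).mp h with ⟨x, y, hw, hs⟩
    exact ⟨ip, hip, x, y, hw, hs⟩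
  · rintro ⟨ip, hip, x, y, hw, hs⟩
    exact ⟨ip, hip, (hone ip).mpr ⟨x, y, hw, hs⟩⟩

-- ===== VERDICT (by name: the statement is the Claim_ definition above) =====
theorem has_ssl_spec : Claim_equal_has_ssl := by
  intro ins out_ _
  unfold Spec_has_ssl
  rw [Bool.eq_iff_iff, A_iff, B_iff]
  constructor
  · rintro ⟨ip, hip, x, y, hw, s, hs, hm⟩
    have hne : y ≠ x := ((mem_win_iff_triple _ _ _).mp hm).1
    exact ⟨ip, hip, x, y, hw, s, hs, (isIn_iff_mem_win _ _ hne _).mpr hm⟩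
  · rintro ⟨ip, hip, x, y, hw, s, hs, hin⟩
    have hne : x ≠ y := ((mem_win_iff_triple _ _ _).mp hw).1
    exact ⟨ip, hip, x, y, hw, s, hs, (isIn_iff_mem_win _ _ (Ne.symm hne) _).mp hin⟩
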